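-- pv_equiv track=rewrite | github.com/Alchemist-X/hack-balatro | scripts/behavior_log.py | straight_exists
-- ===== SOURCE A (Python) =====
-- def straight_exists(unique_ranks: set[int]) -> bool:
--     if len(unique_ranks) < 5:
--         return False
--     values = sorted(unique_ranks)
--     if all(rank in unique_ranks for rank in [0, 1, 2, 3, 12]):
--         return True
--     return any(
--         all(window[index + 1] == window[index] + 1 for index in range(4))
--         for window in (values[offset : offset + 5] for offset in range(len(values) - 4))
--     )
-- ===== SOURCE B (Python) =====
-- def straight_exists(unique_ranks: set[int]) -> bool:
--     if len(unique_ranks) < 5: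
--         return False
--     if all(rank in unique_ranks for rank in (0, 1, 2, 3, 12)):
--         return True
--     return any(
--         all(start + i in unique_ranks for i in range(5))
--         for start in unique_ranks
--     )
-- ===== Notes on version B (the rewrite author's own statement) =====
-- stated objective: simpler
-- what changed: Drops the sort and the sliding-window scan over the sorted list; instead probes the set directly, testing for each rank whether the five consecutive ranks starting at it are all members (wheel special case kept).
import Mathlib
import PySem

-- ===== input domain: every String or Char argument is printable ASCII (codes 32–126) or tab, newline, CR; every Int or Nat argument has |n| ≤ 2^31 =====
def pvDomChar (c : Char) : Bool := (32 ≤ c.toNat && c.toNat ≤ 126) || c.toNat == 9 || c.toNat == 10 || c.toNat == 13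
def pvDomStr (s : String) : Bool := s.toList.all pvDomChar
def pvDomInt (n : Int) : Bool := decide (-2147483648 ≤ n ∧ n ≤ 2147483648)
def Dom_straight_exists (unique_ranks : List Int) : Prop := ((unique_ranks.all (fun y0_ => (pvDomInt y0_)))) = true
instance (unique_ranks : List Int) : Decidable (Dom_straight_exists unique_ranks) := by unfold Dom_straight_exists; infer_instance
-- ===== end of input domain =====

-- B drops A's sort and sliding-window scan, probing the set directly for a run of five
-- consecutive ranks (objective: simpler).

-- ===== PORT A =====
def straight_exists (unique_ranks : List Int) : Bool :=
  if unique_ranks.length < 5 then false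
  else
    let values := PySem.List.sorted unique_ranks (id : Int → Int) false
    if ([0, 1, 2, 3, 12] : List Int).all (fun rank => unique_ranks.contains rank) then true
    else
      (List.range (values.length - 4)).any (fun offset =>
        let window := PySem.List.slice values (some (offset : Int)) (some ((offset : Int) + 5))
        (List.range 4).all (fun index =>
          PySem.List.pyGetD window ((index : Int) + 1) 0 == PySem.List.pyGetD window (index : Int) 0 + 1))

-- ===== PORT B =====
def straight_exists_alt (unique_ranks : List Int) : Bool :=
  if unique_ranks.length < 5 then false
  else if ([0, 1, 2, 3, 12] : List Int).all (fun rank => unique_ranks.contains rank) then true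
  else unique_ranks.any (fun start =>
    (List.range 5).all (fun i => unique_ranks.contains (start + (i : Int))))

-- ===== PRECONDITION & SPEC =====
-- The Python argument is a set[int]; Pre_ restricts the list to the lists that represent
-- one (distinct elements) — a list with duplicates is not a possible input of A.
def Pre_straight_exists (unique_ranks : List Int) : Prop := unique_ranks.Nodup
instance (unique_ranks : List Int) : Decidable (Pre_straight_exists unique_ranks) := by
  unfold Pre_straight_exists; infer_instance

def pvWitness_straight_exists : List Int := ([4, 7, 5, 8, 6, 11])

def Spec_straight_exists (unique_ranks : List Int) (out : Bool) : Prop := out = straight_exists_alt unique_ranks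
instance (unique_ranks : List Int) (out : Bool) : Decidable (Spec_straight_exists unique_ranks out) := by
  unfold Spec_straight_exists; infer_instance

-- ===== CLAIM (what is proved, stated in full; the proofs are below) =====
def Claim_equal_straight_exists : Prop := ∀ (unique_ranks : List Int), Dom_straight_exists unique_ranks → Pre_straight_exists unique_ranks → Spec_straight_exists unique_ranks (straight_exists unique_ranks)

-- ===== LEMMAS AND PROOFS =====

-- In a strictly increasing Int list, the index of v[a] + 1 is a + 1.
theorem pv_step (v : List Int)
    (hst : ∀ (i j : Nat) (_ : i < v.length) (_ : j < v.length), i < j → v[i] < v[j])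
    (a b : Nat) (ha : a < v.length) (hb : b < v.length)
    (hab : v[b] = v[a] + 1) : b = a + 1 := by
  rcases Nat.lt_trichotomy b a with h | h | h
  · have := hst b a hb ha h; omega
  · subst h; omega
  · rcases Nat.lt_or_ge (a + 1) b with h1 | h1
    · have hmid : a + 1 < v.length := by omega
      have h2 := hst a (a+1) ha hmid (by omega)
      have h3 := hst (a+1) b hmid hb h1
      omega
    · omega

-- Core: with distinct elements and length ≥ 5, A's window scan over the sorted list equals
-- B's direct membership probe.
theorem pv_core (u : List Int) (hnd : u.Nodup) (h5 : ¬ u.length < 5) :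
    ((List.range ((PySem.List.sorted u (id : Int → Int) false).length - 4)).any (fun offset =>
        let window := PySem.List.slice (PySem.List.sorted u (id : Int → Int) false)
          (some (offset : Int)) (some ((offset : Int) + 5))
        (List.range 4).all (fun index =>
          PySem.List.pyGetD window ((index : Int) + 1) 0 == PySem.List.pyGetD window (index : Int) 0 + 1)))
    = u.any (fun start =>
        (List.range 5).all (fun i => u.contains (start + (i : Int)))) := by
  have hperm : (PySem.List.sorted u (id : Int → Int) false).Perm u := PySem.List.sorted_perm u _ false
  set v := PySem.List.sorted u (id : Int → Int) false with hv
  have hlen : v.length = u.length := hperm.length_eq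
  have hvnd : v.Nodup := hperm.nodup_iff.mpr hnd
  have hle : List.Pairwise (fun a b : Int => a ≤ b) v := by
    simpa using PySem.List.sorted_pairwise u (id : Int → Int)
  have hst : ∀ (i j : Nat) (_ : i < v.length) (_ : j < v.length), i < j → v[i] < v[j] := by
    intro i j hi hj hij
    have h1 := List.pairwise_iff_getElem.mp hle i j hi hj hij
    have h2 : v[i] ≠ v[j] := fun he => by
      have := (hvnd.getElem_inj_iff).mp he; omega
    omega
  apply Bool.eq_iff_iff.mpr
  simp only [List.any_eq_true, List.all_eq_true, List.mem_range, List.contains_iff_mem]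
  constructor
  · rintro ⟨o, ho, hwin⟩
    have ho5 : o + 5 ≤ v.length := by omega
    have hwe : PySem.List.slice v (some (o : Int)) (some ((o : Int) + 5)) = (v.drop o).take 5 := by
      rw [show ((o : Int) + 5) = ((o : Int) + ((5 : Nat) : Int)) by push_cast; ring,
        PySem.List.slice_natCast_add]
    have hwl : (PySem.List.slice v (some (o : Int)) (some ((o : Int) + 5))).length = 5 := by
      simp [hwe]; omega
    have hcons : ∀ (k : Nat) (hk4 : k < 4), v[o + (k + 1)]'(by omega) = v[o + k]'(by omega) + 1 := by
      intro k hk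
      have h := hwin k hk
      rw [PySem.List.pyGetD_eq_getElem _ 0 (by omega) (by rw [hwl]; push_cast; omega),
        PySem.List.pyGetD_eq_getElem _ 0 (by omega) (by rw [hwl]; push_cast; omega)] at h
      have h2 := beq_iff_eq.mp h
      have e1 : (((k : Int)) + 1).toNat = k + 1 := by omega
      have e0 : ((k : Int)).toNat = k := by omega
      simp only [e1, e0, hwe, List.getElem_take, List.getElem_drop] at h2
      exact h2
    have c0 := hcons 0 (by omega)
    have c1 := hcons 1 (by omega)
    have c2 := hcons 2 (by omega)
    have c3 := hcons 3 (by omega)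
    norm_num at c0 c1 c2 c3
    have c00 : v[o + 0]'(by omega) = v[o]'(by omega) := by norm_num
    refine ⟨v[o]'(by omega), hperm.mem_iff.mp (List.getElem_mem _), ?_⟩
    intro i hi
    interval_cases i <;> push_cast <;>
      [ (have e : v[o]'(by omega) + 0 = v[o + 0]'(by omega) := by omega);
        (have e : v[o]'(by omega) + 1 = v[o + 1]'(by omega) := by omega);
        (have e : v[o]'(by omega) + 2 = v[o + 2]'(by omega) := by omega);
        (have e : v[o]'(by omega) + 3 = v[o + 3]'(by omega) := by omega);
        (have e : v[o]'(by omega) + 4 = v[o + 4]'(by omega) := by omega)] <;>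
      rw [e] <;> exact hperm.mem_iff.mp (List.getElem_mem _)
  · rintro ⟨s, hs, hall⟩
    have hidx : ∀ (k : Nat), k < 5 → ∃ (j : Nat) (h : j < v.length), v[j] = s + (k : Int) := by
      intro k hk
      exact List.mem_iff_getElem.mp (hperm.mem_iff.mpr (hall k (by simpa using hk)))
    obtain ⟨j0, hj0, he0⟩ := hidx 0 (by omega)
    obtain ⟨j1, hj1, he1⟩ := hidx 1 (by omega)
    obtain ⟨j2, hj2, he2⟩ := hidx 2 (by omega)
    obtain ⟨j3, hj3, he3⟩ := hidx 3 (by omega)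
    obtain ⟨j4, hj4, he4⟩ := hidx 4 (by omega)
    push_cast at he0 he1 he2 he3 he4
    have s0 : j1 = j0 + 1 := pv_step v hst j0 j1 hj0 hj1 (by omega)
    subst s0
    have s1 : j2 = (j0 + 1) + 1 := pv_step v hst (j0 + 1) j2 hj1 hj2 (by omega)
    subst s1
    have s2 : j3 = ((j0 + 1) + 1) + 1 := pv_step v hst ((j0 + 1) + 1) j3 hj2 hj3 (by omega)
    subst s2
    have s3 : j4 = (((j0 + 1) + 1) + 1) + 1 := pv_step v hst (((j0 + 1) + 1) + 1) j4 hj3 hj4 (by omega)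
    subst s3
    have ho5 : j0 + 5 ≤ v.length := by omega
    refine ⟨j0, by omega, ?_⟩
    have hwe : PySem.List.slice v (some (j0 : Int)) (some ((j0 : Int) + 5)) = (v.drop j0).take 5 := by
      rw [show ((j0 : Int) + 5) = ((j0 : Int) + ((5 : Nat) : Int)) by push_cast; ring,
        PySem.List.slice_natCast_add]
    have hwl : (PySem.List.slice v (some (j0 : Int)) (some ((j0 : Int) + 5))).length = 5 := by
      simp [hwe]; omega
    intro index hidx4
    rw [PySem.List.pyGetD_eq_getElem _ 0 (by omega) (by rw [hwl]; push_cast; omega),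
      PySem.List.pyGetD_eq_getElem _ 0 (by omega) (by rw [hwl]; push_cast; omega)]
    apply beq_iff_eq.mpr
    have e1 : (((index : Int)) + 1).toNat = index + 1 := by omega
    have e0 : ((index : Int)).toNat = index := by omega
    simp only [e1, e0, hwe, List.getElem_take, List.getElem_drop]
    simp only [show (j0 + 1) + 1 = j0 + 2 from rfl] at he2
    simp only [show ((j0 + 1) + 1) + 1 = j0 + 3 from rfl] at he3
    simp only [show (((j0 + 1) + 1) + 1) + 1 = j0 + 4 from rfl] at he4
    have b0 : v[j0 + 0]'(by omega) = v[j0]'(by omega) := by norm_num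
    interval_cases index <;> norm_num <;> omega

-- ===== VERDICT (by name: the statement is the Claim_ definition above) =====
theorem straight_exists_spec : Claim_equal_straight_exists := by
  intro u _ hpre
  unfold Spec_straight_exists straight_exists straight_exists_alt
  by_cases h5 : u.length < 5
  · simp [h5]
  · simp only [h5, if_false]
    by_cases hw : ([0, 1, 2, 3, 12] : List Int).all (fun rank => u.contains rank) = true
    · rw [hw]; simp
    · simp only [hw]
      exact pv_core u hpre h5
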